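-- pv_equiv track=rewrite | github.com/adam147g/algorithms-and-data-structures | Laboratory/Greedy/Chid cheater.py | build_tower
-- ===== SOURCE A (Python) =====
-- from queue import PriorityQueue
--
-- def build_tower(T):
--     summary = []
--     Queue = PriorityQueue()
--     for i in range(len(T)):
--         T[i].sort()
--         summary.append(sum(T[i]))
--         Queue.put((-summary[i], i))
--     count = tower_height = 0
--     while tower_height < max(summary):
--         # index = summary.index(max(summary)) # zapamiętuję indeks największej dotychczas sumy
--         _, index = Queue.get()  # zabieram ostatni klocek (po posortowaniu - z największą wartością)
--         height = T[index].pop()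
--         tower_height += height
--         summary[index] -= height
--         Queue.put((-summary[index], index))
--         count += 1
--     return count
-- ===== SOURCE B (Python) =====
-- def build_tower(T):
--     for row in T:
--         row.sort()
--     summary = [sum(row) for row in T]
--     count = 0
--     tower_height = 0
--     while True:
--         best = max(range(len(T)), key=lambda i: (summary[i], -i))
--         if not tower_height < summary[best]:
--             return count
--         height = T[best].pop()
--         tower_height += height
--         summary[best] -= height
--         count += 1
-- ===== Notes on version B (the rewrite author's own statement) =====
-- stated objective: simpler
-- what changed: Drops the PriorityQueue (and A's per-iteration max(summary) rescan alongside it): B keeps only the summary list and picks the row to pop by one direct argmax scan per iteration, tie broken on smallest index exactly as the queue's tuple order did.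
import Mathlib
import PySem

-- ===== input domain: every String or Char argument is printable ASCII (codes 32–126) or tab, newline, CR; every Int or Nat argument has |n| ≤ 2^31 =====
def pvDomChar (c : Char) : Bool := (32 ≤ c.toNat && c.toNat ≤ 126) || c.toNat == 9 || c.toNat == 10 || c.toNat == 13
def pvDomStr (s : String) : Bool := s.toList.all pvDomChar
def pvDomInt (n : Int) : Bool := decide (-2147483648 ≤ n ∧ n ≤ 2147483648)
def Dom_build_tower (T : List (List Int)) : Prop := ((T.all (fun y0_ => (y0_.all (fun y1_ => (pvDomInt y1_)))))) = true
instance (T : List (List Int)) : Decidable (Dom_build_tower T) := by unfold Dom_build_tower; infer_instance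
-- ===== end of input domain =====

-- B drops A's PriorityQueue and per-iteration max(summary) rescan in favour of one direct
-- argmax scan per iteration (tie broken on smallest index): simpler, no queue is maintained.
-- Both A and B mutate T in place in Python (sort each row, pop blocks) in the same way; the
-- equivalence proved here is about the RETURN value.

-- shared helper: 'xs[i] = v' for the indices reached here (always 0 ≤ i < len(xs); exact there)
def setIdx {α : Type} (xs : List α) (i : Int) (v : α) : List α :=
  if 0 ≤ i then xs.set i.toNat v else xs

-- ===== PORT A =====
-- init loop 'for i in range(len(T)): T[i].sort(); summary.append(sum(T[i])); Queue.put((-summary[i], i))'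
-- as the obvious structural recursion on the rows with the running index i
def aInit : List (List Int) → Int → List (List Int) × List Int × List (Int × Int)
  | [], _ => ([], [], [])
  | row :: rest, i =>
    let row' := PySem.List.sorted row (fun x => x) false
    let s := row'.sum
    let r := aInit rest (i + 1)
    (row' :: r.1, s :: r.2.1, (-s, i) :: r.2.2)

-- the while loop; PriorityQueue modelled as a list of tuples: put = append, get = remove the
-- lexicographically minimal (-summary, index) pair (entries are pairwise distinct).
-- Fuel only makes the recursion structural; the 'none'/fuel-0 fallbacks are where Python raises
-- (max([]) on empty T — excluded by Pre_ — resp. unreachable states).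
def aLoop : Nat → List (List Int) → List Int → List (Int × Int) → Int → Int → Int
  | 0, _, _, _, count, _ => count
  | fuel + 1, T, summary, q, count, th =>
    match PySem.List.max? summary (fun x => x) with
    | none => count
    | some m =>
      if th < m then
        match PySem.List.min2? q Prod.fst Prod.snd with
        | none => count
        | some e =>
          let q1 := q.erase e
          let index := e.2
          match PySem.List.pop? (PySem.List.pyGetD T index []) (-1) with
          | none => count
          | some hr =>
            let s' := setIdx summary index (PySem.List.pyGetD summary index 0 - hr.1)
            aLoop fuel (setIdx T index hr.2) s'
              (q1 ++ [(-(PySem.List.pyGetD s' index 0), index)]) (count + 1) (th + hr.1)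
      else count

def build_tower (T : List (List Int)) : Int :=
  let r := aInit T 0
  aLoop ((T.map List.length).sum + 1) r.1 r.2.1 r.2.2 0 0

-- ===== PORT B =====
-- Source B's while loop: best = max(range(len(T)), key=lambda i: (summary[i], -i)); no queue
def bLoop : Nat → List (List Int) → List Int → Int → Int → Int
  | 0, _, _, count, _ => count
  | fuel + 1, T, summary, count, th =>
    match PySem.List.max2? (PySem.List.pyRange 0 T.length 1)
        (fun i => PySem.List.pyGetD summary i 0) (fun i => -i) with
    | none => count
    | some best =>
      if th < PySem.List.pyGetD summary best 0 then
        match PySem.List.pop? (PySem.List.pyGetD T best []) (-1) with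
        | none => count
        | some hr =>
          bLoop fuel (setIdx T best hr.2)
            (setIdx summary best (PySem.List.pyGetD summary best 0 - hr.1)) (count + 1) (th + hr.1)
      else count

def build_tower_alt (T : List (List Int)) : Int :=
  let T1 := T.map (fun row => PySem.List.sorted row (fun x => x) false)
  let summary := T1.map List.sum
  bLoop ((T.map List.length).sum + 1) T1 summary 0 0

-- ===== PRECONDITION & SPEC =====
-- Pre_ excludes only the empty list, on which A's max(summary) raises ValueError (B raises too).
def Pre_build_tower (T : List (List Int)) : Prop := T ≠ []
instance (T : List (List Int)) : Decidable (Pre_build_tower T) := by unfold Pre_build_tower; infer_instance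
def pvWitness_build_tower : List (List Int) := [[1]]

def Spec_build_tower (T : List (List Int)) (out : Int) : Prop := out = build_tower_alt T
instance (T : List (List Int)) (out : Int) : Decidable (Spec_build_tower T out) := by unfold Spec_build_tower; infer_instance

-- ===== CLAIM (what is proved, stated in full; the proofs are below) =====
def Claim_equal_build_tower : Prop := ∀ (T : List (List Int)), Dom_build_tower T → Pre_build_tower T → Spec_build_tower T (build_tower T)

-- ===== LEMMAS AND PROOFS =====

theorem lex_trans {a b c d e f : Int} (h1 : a < c ∨ (a = c ∧ b ≤ d)) (h2 : c < e ∨ (c = e ∧ d ≤ f)) :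
    a < e ∨ (a = e ∧ b ≤ f) := by omega

theorem max2_fold_aux {α : Type} (k1 k2 : α → Int) :
    ∀ (xs : List α) (acc : Option α) (e : α),
    xs.foldl (fun acc x => match acc with
      | none => some x
      | some m => if (decide (k1 m < k1 x) || !decide (k1 x < k1 m) && decide (k2 m < k2 x)) = true then some x else some m) acc = some e →
    ((e ∈ xs ∨ acc = some e) ∧ (∀ y ∈ xs, k1 y < k1 e ∨ (k1 y = k1 e ∧ k2 y ≤ k2 e)) ∧
      (∀ a, acc = some a → (k1 a < k1 e ∨ (k1 a = k1 e ∧ k2 a ≤ k2 e)))) := by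
  intro xs
  induction xs with
  | nil =>
    intro acc e h
    simp only [List.foldl_nil] at h
    refine ⟨Or.inr h, by simp, ?_⟩
    intro a ha
    rw [h] at ha
    cases ha
    right; exact ⟨rfl, le_refl _⟩
  | cons x t ih =>
    intro acc e h
    simp only [List.foldl_cons] at h
    -- analyse the step
    match hacc : acc with
    | none =>
      have h' := h
      simp only [] at h'
      obtain ⟨hmem, hall, hacc'⟩ := ih (some x) e h'
      have hxe := hacc' x rfl
      refine ⟨?_, ?_, by intro a ha; cases ha⟩
      · rcases hmem with hm | hm
        · exact Or.inl (List.mem_cons_of_mem _ hm)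
        · cases hm; exact Or.inl (List.mem_cons_self)
      · intro y hy
        rcases List.mem_cons.mp hy with rfl | hy'
        · exact hxe
        · exact hall y hy'
    | some m =>
      by_cases hc : (decide (k1 m < k1 x) || !decide (k1 x < k1 m) && decide (k2 m < k2 x)) = true
      · have h' := h
        simp only [hc, if_pos] at h'
        obtain ⟨hmem, hall, hacc'⟩ := ih (some x) e h'
        have hxe := hacc' x rfl
        have hmx : k1 m < k1 x ∨ (k1 m = k1 x ∧ k2 m ≤ k2 x) := by
          simp only [Bool.or_eq_true, Bool.and_eq_true, Bool.not_eq_true', decide_eq_true_eq,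
            decide_eq_false_iff_not] at hc
          omega
        refine ⟨?_, ?_, ?_⟩
        · rcases hmem with hm | hm
          · exact Or.inl (List.mem_cons_of_mem _ hm)
          · injection hm with hm; subst hm; exact Or.inl List.mem_cons_self
        · intro y hy
          rcases List.mem_cons.mp hy with rfl | hy'
          · exact hxe
          · exact hall y hy'
        · intro a ha
          injection ha with ha; subst ha
          exact lex_trans hmx hxe
      · have h' := h
        simp only [hc, if_neg, Bool.not_eq_true] at h'
        obtain ⟨hmem, hall, hacc'⟩ := ih (some m) e h'
        have hme := hacc' m rfl
        have hxm : k1 x < k1 m ∨ (k1 x = k1 m ∧ k2 x ≤ k2 m) := by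
          simp only [Bool.or_eq_true, Bool.and_eq_true, Bool.not_eq_true', decide_eq_true_eq,
            decide_eq_false_iff_not] at hc
          omega
        refine ⟨?_, ?_, ?_⟩
        · rcases hmem with hm | hm
          · exact Or.inl (List.mem_cons_of_mem _ hm)
          · injection hm with hm; subst hm; exact Or.inr rfl
        · intro y hy
          rcases List.mem_cons.mp hy with rfl | hy'
          · exact lex_trans hxm hme
          · exact hall y hy'
        · intro a ha
          injection ha with ha; subst ha
          exact hme

theorem max2_int_spec {α : Type} {k1 k2 : α → Int} {xs : List α} {e : α}
    (h : PySem.List.max2? xs k1 k2 = some e) :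
    e ∈ xs ∧ ∀ y ∈ xs, k1 y < k1 e ∨ (k1 y = k1 e ∧ k2 y ≤ k2 e) := by
  unfold PySem.List.max2? at h
  obtain ⟨hmem, hall, -⟩ := max2_fold_aux k1 k2 xs none e h
  refine ⟨?_, hall⟩
  rcases hmem with hm | hm
  · exact hm
  · cases hm

theorem min2_eq_max2_neg {α : Type} (xs : List α) (k1 k2 : α → Int) :
    PySem.List.min2? xs k1 k2 = PySem.List.max2? xs (fun a => -(k1 a)) (fun a => -(k2 a)) := by
  unfold PySem.List.min2? PySem.List.max2?
  congr 1
  funext acc x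
  match acc with
  | none => rfl
  | some m => simp [neg_lt_neg_iff]

theorem min2_int_spec {α : Type} {k1 k2 : α → Int} {xs : List α} {e : α}
    (h : PySem.List.min2? xs k1 k2 = some e) :
    e ∈ xs ∧ ∀ y ∈ xs, k1 e < k1 y ∨ (k1 e = k1 y ∧ k2 e ≤ k2 y) := by
  rw [min2_eq_max2_neg] at h
  obtain ⟨hmem, hall⟩ := max2_int_spec h
  refine ⟨hmem, ?_⟩
  intro y hy
  have := hall y hy
  omega

theorem max2_fold_some {α : Type} (k1 k2 : α → Int) :
    ∀ (t : List α) (m : α), ∃ e, t.foldl (fun acc x => match acc with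
      | none => some x
      | some m => if (decide (k1 m < k1 x) || !decide (k1 x < k1 m) && decide (k2 m < k2 x)) = true then some x else some m) (some m) = some e := by
  intro t
  induction t with
  | nil => intro m; exact ⟨m, rfl⟩
  | cons x t ih =>
    intro m
    simp only [List.foldl_cons]
    by_cases hc : (decide (k1 m < k1 x) || !decide (k1 x < k1 m) && decide (k2 m < k2 x)) = true
    · simpa [hc] using ih x
    · simpa [hc] using ih m

theorem max2_isSome {α : Type} {k1 k2 : α → Int} {xs : List α} (h : xs ≠ []) :
    ∃ e, PySem.List.max2? xs k1 k2 = some e := by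
  match xs with
  | [] => exact absurd rfl h
  | x :: t =>
    unfold PySem.List.max2?
    simp only [List.foldl_cons]
    exact max2_fold_some k1 k2 t x

theorem min2_isSome {α : Type} {k1 k2 : α → Int} {xs : List α} (h : xs ≠ []) :
    ∃ e, PySem.List.min2? xs k1 k2 = some e := by
  rw [min2_eq_max2_neg]
  exact max2_isSome h

def canonFrom : List Int → Int → List (Int × Int)
  | [], _ => []
  | x :: xs, i => (-x, i) :: canonFrom xs (i + 1)

theorem mem_canonFrom {y : Int × Int} : ∀ (s : List Int) (i : Int),
    y ∈ canonFrom s i ↔ ∃ k : Nat, ∃ h : k < s.length, y = (-(s[k]), i + k) := by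
  intro s
  induction s with
  | nil => intro i; simp [canonFrom]
  | cons x t ih =>
    intro i
    simp only [canonFrom, List.mem_cons, ih (i + 1)]
    constructor
    · rintro (rfl | ⟨k, hk, rfl⟩)
      · exact ⟨0, by simp, by simp⟩
      · exact ⟨k + 1, by simpa using hk, by simp; ring⟩
    · rintro ⟨k, hk, rfl⟩
      match k with
      | 0 => left; simp
      | k + 1 =>
        right
        refine ⟨k, by simpa using hk, ?_⟩
        simp; ring

theorem canonFrom_erase_set : ∀ (s : List Int) (i : Int) (k : Nat) (hk : k < s.length) (v : Int),
    ((canonFrom s i).erase ((-(s[k]), i + k)) ++ [(-v, i + k)]).Perm (canonFrom (s.set k v) i) := by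
  intro s
  induction s with
  | nil => intro i k hk; simp at hk
  | cons x t ih =>
    intro i k hk v
    match k with
    | 0 =>
      simp only [canonFrom, List.getElem_cons_zero, List.set_cons_zero]
      rw [show ((i : Int) + (0 : Nat)) = i by simp]
      rw [List.erase_cons_head]
      exact List.perm_append_singleton _ _
    | k + 1 =>
      simp only [canonFrom, List.getElem_cons_succ, List.set_cons_succ]
      have hne : ¬((((-x : Int), i) == ((-(t[k]'(by simpa using hk)), i + (k + 1 : Nat))) ) = true) := by
        simp only [beq_iff_eq, Prod.mk.injEq, not_and]
        intro _
        push_cast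
        omega
      rw [List.erase_cons_tail hne]
      have : (i + ((k : Nat) + 1 : Nat) : Int) = (i + 1) + (k : Nat) := by push_cast; ring
      rw [this, List.cons_append]
      exact List.Perm.cons _ (ih (i + 1) k (by simpa using hk) v)

theorem length_canonFrom : ∀ (s : List Int) (i : Int), (canonFrom s i).length = s.length := by
  intro s
  induction s with
  | nil => intro i; rfl
  | cons x t ih => intro i; simp [canonFrom, ih]

-- the selection made by A's queue and by B's argmax scan coincide
theorem select_spec (s : List Int) (hs : s ≠ []) (q : List (Int × Int))
    (hq : q.Perm (canonFrom s 0)) :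
    ∃ (jb : Nat) (hj : jb < s.length),
      PySem.List.max2? (PySem.List.pyRange 0 (s.length : Int) 1)
          (fun i => PySem.List.pyGetD s i 0) (fun i => -i) = some ((jb : Nat) : Int) ∧
      PySem.List.min2? q Prod.fst Prod.snd = some (-(s[jb]), ((jb : Nat) : Int)) ∧
      PySem.List.max? s (fun x => x) = some (s[jb]) := by
  have hn : 0 < s.length := List.length_pos_iff.mpr hs
  have hget : ∀ (k : Nat) (hk : k < s.length), PySem.List.pyGetD s ((k : Nat) : Int) 0 = s[k]'hk := by
    intro k hk
    rw [PySem.List.pyGetD_natCast]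
    exact List.getD_eq_getElem s 0 hk
  have hrne : PySem.List.pyRange 0 (s.length : Int) 1 ≠ [] := by
    rw [PySem.List.pyRange_one_cons (by exact_mod_cast hn)]
    exact List.cons_ne_nil _ _
  obtain ⟨b, hb⟩ := max2_isSome (k1 := fun i => PySem.List.pyGetD s i 0) (k2 := fun i => -i) hrne
  obtain ⟨hbmem, hbmax⟩ := max2_int_spec hb
  rw [PySem.List.mem_pyRange_one] at hbmem
  obtain ⟨hb0, hbn⟩ := hbmem
  have hj : b.toNat < s.length := by omega
  have hqne : q ≠ [] := by
    intro hqe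
    have hl := hq.length_eq
    rw [hqe, length_canonFrom] at hl
    simp at hl
    omega
  obtain ⟨e, he⟩ := min2_isSome (k1 := Prod.fst) (k2 := Prod.snd) hqne
  obtain ⟨hemem, hemin⟩ := min2_int_spec he
  obtain ⟨k0, hk0, rfl⟩ := (mem_canonFrom s 0).mp (hq.mem_iff.mp hemem)
  have hyb : ((-(s[b.toNat]'hj), (0 : Int) + ((b.toNat : Nat) : Int)) : Int × Int) ∈ q :=
    hq.mem_iff.mpr ((mem_canonFrom s 0).mpr ⟨b.toNat, hj, rfl⟩)
  have h1 := hemin _ hyb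
  have h2 := hbmax ((k0 : Nat) : Int)
    (PySem.List.mem_pyRange_one.mpr ⟨by omega, by exact_mod_cast hk0⟩)
  simp only [hget k0 hk0] at h2
  rw [show b = ((b.toNat : Nat) : Int) from (Int.toNat_of_nonneg hb0).symm, hget b.toNat hj] at h2
  simp only at h1
  have hkj : k0 = b.toNat := by omega
  have hbk : b = ((k0 : Nat) : Int) := by omega
  rw [hbk] at hb
  refine ⟨k0, hk0, hb, ?_, ?_⟩
  · rw [he]
    congr 1
    simp
  · cases hmx : PySem.List.max? s (fun x => x) with
    | none => exact absurd ((PySem.List.max?_eq_none_iff s _).mp hmx) hs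
    | some m =>
      have hmm := PySem.List.max?_mem hmx
      have hmax := PySem.List.max?_isMax hmx
      obtain ⟨km, hkm, rfl⟩ := List.mem_iff_getElem.mp hmm
      have h3 := hbmax ((km : Nat) : Int)
        (PySem.List.mem_pyRange_one.mpr ⟨by omega, by exact_mod_cast hkm⟩)
      simp only [hget km hkm, hbk, hget k0 hk0] at h3
      have h4 := hmax _ (List.getElem_mem hk0)
      simp only at h4
      congr 1
      omega

theorem setIdx_natCast {α : Type} (xs : List α) (k : Nat) (v : α) :
    setIdx xs ((k : Nat) : Int) v = xs.set k v := by
  simp [setIdx]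

theorem loop_eq : ∀ (fuel : Nat) (T : List (List Int)) (s : List Int) (q : List (Int × Int)) (count th : Int),
    q.Perm (canonFrom s 0) → s.length = T.length →
    aLoop fuel T s q count th = bLoop fuel T s count th := by
  intro fuel
  induction fuel with
  | zero => intro T s q count th _ _; rfl
  | succ fuel ih =>
    intro T s q count th hq hlen
    by_cases hs : s = []
    · subst hs
      have hT : T.length = 0 := by simpa using hlen.symm
      simp [aLoop, bLoop, hT, PySem.List.max?, PySem.List.max2?, PySem.List.pyRange]
    · obtain ⟨jb, hj, hbmax2, hmin2, hmaxs⟩ := select_spec s hs q hq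
      have hgj : PySem.List.pyGetD s ((jb : Nat) : Int) 0 = s[jb] := by
        rw [PySem.List.pyGetD_natCast]
        exact List.getD_eq_getElem s 0 hj
      simp only [aLoop, bLoop]
      rw [hmaxs, hmin2, ← hlen, hbmax2]
      dsimp only
      rw [hgj]
      by_cases hth : th < s[jb]
      · simp only [if_pos hth]
        cases hpop : PySem.List.pop? (PySem.List.pyGetD T ((jb : Nat) : Int) []) (-1) with
        | none => rfl
        | some hr =>
          -- the updated summary
          have hw : setIdx s ((jb : Nat) : Int) (s[jb] - hr.1) = s.set jb (s[jb] - hr.1) :=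
            setIdx_natCast s jb _
          have hgj' : PySem.List.pyGetD (s.set jb (s[jb] - hr.1)) ((jb : Nat) : Int) 0
              = s[jb] - hr.1 := by
            rw [PySem.List.pyGetD_natCast]
            rw [List.getD_eq_getElem _ 0 (by simpa using hj)]
            exact List.getElem_set_self _
          have hperm : ((q.erase ((-(s[jb]), ((jb : Nat) : Int))) ++ [(-(s[jb] - hr.1), ((jb : Nat) : Int))]).Perm
              (canonFrom (s.set jb (s[jb] - hr.1)) 0)) := by
            have h5 := canonFrom_erase_set s 0 jb hj (s[jb] - hr.1)
            simp only [zero_add] at h5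
            exact ((List.Perm.erase _ hq).append_right _).trans h5
          have hlen' : (s.set jb (s[jb] - hr.1)).length = (setIdx T ((jb : Nat) : Int) hr.2).length := by
            simp [setIdx, hlen]
          simp only [hw, hgj']
          exact ih _ _ _ _ _ hperm hlen'
      · simp only [if_neg hth]

theorem aInit_spec : ∀ (T : List (List Int)) (i : Int),
    aInit T i = (T.map (fun row => PySem.List.sorted row (fun x => x) false),
                 T.map (fun row => (PySem.List.sorted row (fun x => x) false).sum),
                 canonFrom (T.map (fun row => (PySem.List.sorted row (fun x => x) false).sum)) i) := by
  intro T
  induction T with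
  | nil => intro i; rfl
  | cons row rest ih => intro i; simp [aInit, canonFrom, ih]


-- ===== VERDICT (by name: the statement is the Claim_ definition above) =====
theorem build_tower_spec : Claim_equal_build_tower := by
  intro T _ _
  unfold Spec_build_tower build_tower build_tower_alt
  rw [aInit_spec]
  simp only [List.map_map]
  exact loop_eq _ _ _ _ 0 0 (List.Perm.refl _) (by simp)
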